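-- pv_equiv track=rewrite | github.com/LakshyaG42/Data-Processing--hw2- | pokemon.py | weaknessType
-- ===== SOURCE A (Python) =====
-- def weaknessType(data):
--     typeDict = {}
--     for row in data:
--         if(row['type'].lower() != 'nan' and row['weakness'].lower() != 'nan'):
--             if(row['weakness'] not in typeDict.keys()):
--                 typeDict[row['weakness']] = row['type']
--     for row in data:
--         if(row['type'].lower() == 'nan' and row['weakness'].lower() != 'nan'):
--             row['type'] = typeDict[row['weakness']]
--     return data
-- ===== SOURCE B (Python) =====
-- def weaknessType(data):
--     # One pass, no precomputed dict: fill a missing type by scanning for the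
--     # first row sharing the weakness. Mutates the row dicts in place, like A.
--     for row in data:
--         if row['type'].lower() == 'nan' and row['weakness'].lower() != 'nan':
--             w = row['weakness']
--             row['type'] = next(r['type'] for r in data
--                                if r['weakness'] == w and r['type'].lower() != 'nan')
--     return data
-- ===== Notes on version B (the rewrite author's own statement) =====
-- stated objective: simpler
-- what changed: Drops the precomputed weakness-to-type dictionary pass: a single loop fills each missing type by scanning the list for the first row with the same weakness and a known type (same first-match value as the dict).
import Mathlib
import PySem

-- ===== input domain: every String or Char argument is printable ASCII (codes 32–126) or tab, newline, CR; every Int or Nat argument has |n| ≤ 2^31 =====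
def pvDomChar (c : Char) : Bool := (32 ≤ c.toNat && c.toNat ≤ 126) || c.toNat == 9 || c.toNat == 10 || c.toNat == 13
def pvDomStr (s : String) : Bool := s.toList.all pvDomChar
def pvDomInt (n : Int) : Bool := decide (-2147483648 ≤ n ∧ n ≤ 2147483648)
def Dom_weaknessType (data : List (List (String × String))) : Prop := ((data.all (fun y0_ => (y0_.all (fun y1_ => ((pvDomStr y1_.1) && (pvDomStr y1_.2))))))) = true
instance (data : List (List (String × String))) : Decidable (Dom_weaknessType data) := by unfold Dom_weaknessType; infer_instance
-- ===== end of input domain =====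

-- B replaces A's precomputed weakness→type dict with a single pass that scans for the first
-- row sharing the weakness (simpler decomposition, same return value; both mutate rows in
-- place in Python — the equivalence proved here is about the return value).


-- ===== PORT A =====
-- rows arrive as assoc lists; each Python dict row is PySem.Dict.ofList of it
-- (Python's row['k'] raises KeyError on a missing key, and typeDict[w] on a miss:
--  Pre_ excludes both, so the getD defaults are never reached inside Pre_).
def weaknessType (data : List (List (String × String))) : List (List (String × String)) :=
  let rows := data.map (fun r => PySem.Dict.ofList r)
  let typeDict := rows.foldl (fun td row =>
    if PySem.Str.lower (row.getD "type" "") != "nan" &&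
       PySem.Str.lower (row.getD "weakness" "") != "nan" then
      if !(td.contains (row.getD "weakness" "")) then
        td.insert (row.getD "weakness" "") (row.getD "type" "")
      else td
    else td) PySem.Dict.empty
  rows.map (fun row =>
    if PySem.Str.lower (row.getD "type" "") == "nan" &&
       PySem.Str.lower (row.getD "weakness" "") != "nan" then
      (row.insert "type" (typeDict.getD (row.getD "weakness" "") "")).items
    else row.items)

-- ===== PORT B =====
-- Source B scans the (partially filled) list for the first row with this weakness and a
-- non-'nan' type; every already-filled row holds exactly that first value, so scanning
-- the ORIGINAL rows gives the same result (a next(...) over data, here List.find?).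
def weaknessType_alt (data : List (List (String × String))) : List (List (String × String)) :=
  let rows := data.map (fun r => PySem.Dict.ofList r)
  rows.map (fun row =>
    if PySem.Str.lower (row.getD "type" "") == "nan" &&
       PySem.Str.lower (row.getD "weakness" "") != "nan" then
      let w := row.getD "weakness" ""
      match rows.find? (fun r => r.getD "weakness" "" == w &&
                                 PySem.Str.lower (r.getD "type" "") != "nan") with
      | some r => (row.insert "type" (r.getD "type" "")).items
      | none => row.items   -- Python B raises StopIteration here; excluded by Pre_
    else row.items)

-- ===== PRECONDITION & SPEC =====
-- Pre_ admits exactly the inputs on which Python A returns: every row has both keys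
-- (A reads row['type'] always and row['weakness'] in one of its two loops), and every
-- row with a missing type and known weakness has a donor row (else typeDict[w] raises KeyError).
def Pre_weaknessType (data : List (List (String × String))) : Prop :=
  ∀ r ∈ data, ((PySem.Dict.ofList r).contains "type" ∧ (PySem.Dict.ofList r).contains "weakness")
    ∧ (PySem.Str.lower ((PySem.Dict.ofList r).getD "type" "") = "nan" →
       PySem.Str.lower ((PySem.Dict.ofList r).getD "weakness" "") ≠ "nan" →
       ∃ r' ∈ data, (PySem.Dict.ofList r').getD "weakness" "" = (PySem.Dict.ofList r).getD "weakness" ""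
                    ∧ PySem.Str.lower ((PySem.Dict.ofList r').getD "type" "") ≠ "nan")
instance (data : List (List (String × String))) : Decidable (Pre_weaknessType data) := by
  unfold Pre_weaknessType; infer_instance

def pvWitness_weaknessType : (List (List (String × String))) :=
  [[("type", "nan"), ("weakness", "Fire")], [("type", "Water"), ("weakness", "Fire")]]

def Spec_weaknessType (data : List (List (String × String))) (out : List (List (String × String))) : Prop := out = weaknessType_alt data
instance (data : List (List (String × String))) (out : List (List (String × String))) : Decidable (Spec_weaknessType data out) := by unfold Spec_weaknessType; infer_instance

-- ===== CLAIM (what is proved, stated in full; the proofs are below) =====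
def Claim_equal_weaknessType : Prop := ∀ (data : List (List (String × String))), Dom_weaknessType data → Pre_weaknessType data → Spec_weaknessType data (weaknessType data)

-- ===== LEMMAS AND PROOFS =====

-- the per-row predicate B scans with
def pvMatch (w : String) (r : PySem.Dict String String) : Bool :=
  r.getD "weakness" "" == w && PySem.Str.lower (r.getD "type" "") != "nan"

-- A's fold step
def pvStep (td : PySem.Dict String String) (row : PySem.Dict String String) : PySem.Dict String String :=
  if PySem.Str.lower (row.getD "type" "") != "nan" &&
     PySem.Str.lower (row.getD "weakness" "") != "nan" then
    if !(td.contains (row.getD "weakness" "")) then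
      td.insert (row.getD "weakness" "") (row.getD "type" "")
    else td
  else td

-- A's dict, looked up at a non-'nan' weakness, is the type of the first matching row.
theorem pvFold_get? (rows : List (PySem.Dict String String)) (td : PySem.Dict String String)
    (w : String) (hw : PySem.Str.lower w ≠ "nan") :
    (rows.foldl pvStep td).get? w =
      (td.get? w).or ((rows.find? (pvMatch w)).map (fun r => r.getD "type" "")) := by
  induction rows generalizing td with
  | nil => simp
  | cons row rest ih =>
    simp only [List.foldl_cons, List.find?_cons]
    by_cases ht : PySem.Str.lower (row.getD "type" "") = "nan"
    · have hm : pvMatch w row = false := by simp [pvMatch, ht]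
      have hs : pvStep td row = td := by simp [pvStep, ht]
      rw [hm, hs]; simpa using ih td
    · by_cases hwr : row.getD "weakness" "" = w
      · have hm : pvMatch w row = true := by simp [pvMatch, hwr, ht]
        have hg : PySem.Str.lower (row.getD "weakness" "") ≠ "nan" := by rw [hwr]; exact hw
        by_cases hc : td.contains w = true
        · have hsome : (td.get? w).isSome := by
            rw [← PySem.Dict.contains_eq_isSome_get?]; exact hc
          obtain ⟨v, hv⟩ := Option.isSome_iff_exists.mp hsome
          have hs : pvStep td row = td := by simp [pvStep, ht, hw, hwr, hc]
          rw [hm, hs, ih td, hv]; simp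
        · have hc' : td.contains w = false := by simpa using hc
          have hnone : td.get? w = none := by
            rw [PySem.Dict.get?_eq_none_iff_contains]; exact hc'
          have hs : pvStep td row = td.insert w (row.getD "type" "") := by
            simp [pvStep, ht, hw, hwr, hc']
          rw [hm, hs, ih (td.insert w (row.getD "type" "")),
            PySem.Dict.get?_insert_self, hnone]
          simp
      · have hm : pvMatch w row = false := by simp [pvMatch, hwr]
        have hkey : (pvStep td row).get? w = td.get? w := by
          by_cases hg : PySem.Str.lower (row.getD "weakness" "") = "nan"
          · simp [pvStep, hg]
          · by_cases hc : td.contains (row.getD "weakness" "") = true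
            · simp [pvStep, hc]
            · have hc' : td.contains (row.getD "weakness" "") = false := by simpa using hc
              by_cases ht2 : PySem.Str.lower (row.getD "type" "") = "nan"
              · simp [pvStep, ht2]
              · have hs : pvStep td row = td.insert (row.getD "weakness" "") (row.getD "type" "") := by
                  simp [pvStep, ht2, hg, hc']
                rw [hs]
                exact PySem.Dict.get?_insert_of_ne td _ (Ne.symm hwr)
        rw [hm, ih (pvStep td row), hkey]

theorem weaknessType_spec : Claim_equal_weaknessType := by
  intro data _ hpre
  unfold Spec_weaknessType weaknessType_alt
  show (data.map (fun r => PySem.Dict.ofList r)).map _ =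
       (data.map (fun r => PySem.Dict.ofList r)).map _
  apply List.map_congr_left
  intro row hrow
  obtain ⟨r, hr, hrow⟩ := List.mem_map.mp hrow
  subst hrow
  by_cases hcond : (PySem.Str.lower ((PySem.Dict.ofList r).getD "type" "") == "nan" &&
      PySem.Str.lower ((PySem.Dict.ofList r).getD "weakness" "") != "nan") = true
  · rw [if_pos hcond, if_pos hcond]
    obtain ⟨ht, hw⟩ : PySem.Str.lower ((PySem.Dict.ofList r).getD "type" "") = "nan" ∧
        PySem.Str.lower ((PySem.Dict.ofList r).getD "weakness" "") ≠ "nan" := by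
      simpa [Bool.and_eq_true] using hcond
    obtain ⟨r', hr', hweq, ht'⟩ := ((hpre r hr).2) ht hw
    set rows := data.map (fun r => PySem.Dict.ofList r) with hrows
    set w := (PySem.Dict.ofList r).getD "weakness" "" with hwdef
    have hmem : PySem.Dict.ofList r' ∈ rows ∧ pvMatch w (PySem.Dict.ofList r') = true := by
      exact ⟨List.mem_map.mpr ⟨r', hr', rfl⟩, by simp [pvMatch, hweq, ht']⟩
    have hissome : (rows.find? (pvMatch w)).isSome := by
      rw [List.find?_isSome]
      exact ⟨_, hmem.1, hmem.2⟩
    obtain ⟨r0, hfind⟩ := Option.isSome_iff_exists.mp hissome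
    have hfold : (rows.foldl pvStep PySem.Dict.empty).get? w = some (r0.getD "type" "") := by
      rw [pvFold_get? rows PySem.Dict.empty w hw, hfind]
      simp
    show (PySem.Dict.insert _ "type"
        ((rows.foldl pvStep PySem.Dict.empty).getD w "")).items = _
    rw [PySem.Dict.getD_eq_get?_getD, hfold]
    show _ = (match rows.find? (pvMatch w) with
      | some r0 => (PySem.Dict.insert (PySem.Dict.ofList r) "type" (r0.getD "type" "")).items
      | none => (PySem.Dict.ofList r).items)
    rw [hfind]
    rfl
  · rw [if_neg hcond, if_neg hcond]
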